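-- pv_equiv track=rewrite | github.com/unabl4/codefights | kinder_levon/kinder_levon.py | kinderLevon
-- ===== SOURCE A (Python) =====
-- def divisors(n):
--     c = d = 0
--     # for i in range(1,int(n**0.5)+1):
--     i = 1
--     while i**2 <= n:
--         if n % i == 0:
--             if n / i == i:
--                 # border number - to be accounted separately
--                 d += 1
--             else:
--                 c += 1
--
--         i += 1
--     return 2*c+d
--
-- def ps(s):
--     n = len(s)
--     v = set() # sum sets
--     for i in range(1,1 << n): # avoid empty sub-sets
--         z = 0 # subset sum
--         for j in range(n): # items
--             if i & (1 << j):
--                 z += s[j]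
--         v.add(z)
--
--     return v
--
-- def kinderLevon(b):
--     md = mc = 0 # max divisors/candies
--     for i in ps(b):
--         d = divisors(i) # get the number of divisors
--         if d > md or (d == md and i < mc):
--             md = d
--             mc = i
--
--     return mc
-- ===== SOURCE B (Python) =====
-- def _divcount(n):
--     # number of divisors of n (0 for n <= 0): pair-count up to sqrt, square checked once at the end
--     cnt = 0
--     i = 1
--     while i * i < n:
--         if n % i == 0:
--             cnt += 2
--         i += 1
--     if i * i == n:
--         cnt += 1
--     return cnt
--
-- def kinderLevon(b):
--     # subset-sum DP over distinct achievable sums instead of enumerating all 2^n bitmasks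
--     sums = set()
--     for x in b:
--         new = {s + x for s in sums}
--         new.add(x)
--         sums |= new
--     best_d = 0
--     best_s = 0
--     for s in sums:
--         ds = _divcount(s)
--         if (ds, -s) > (best_d, -best_s):
--             best_d, best_s = ds, s
--     return best_s
-- ===== Notes on version B (the rewrite author's own statement) =====
-- stated objective: faster
-- what changed: B enumerates the achievable subset sums with a set-based DP over distinct sums (and counts divisor pairs with a strict sqrt loop plus a final square check) instead of A's enumeration of all 2^n bitmasks with an inner index scan per mask.
import Mathlib
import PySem

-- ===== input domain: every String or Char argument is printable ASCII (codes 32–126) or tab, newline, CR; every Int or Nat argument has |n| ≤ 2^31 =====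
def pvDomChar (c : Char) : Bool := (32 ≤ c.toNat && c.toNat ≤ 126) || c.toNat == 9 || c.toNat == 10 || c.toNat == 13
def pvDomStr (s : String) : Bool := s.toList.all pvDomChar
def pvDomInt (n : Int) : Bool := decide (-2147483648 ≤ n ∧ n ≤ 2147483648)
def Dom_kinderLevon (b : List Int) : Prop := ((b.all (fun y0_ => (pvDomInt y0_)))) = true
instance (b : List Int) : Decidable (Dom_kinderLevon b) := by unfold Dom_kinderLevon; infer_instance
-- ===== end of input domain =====

-- B replaces A's O(2^n) bitmask enumeration of subset sums with a subset-sum set DP over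
-- distinct achievable sums (and a slightly different divisor-pair count): asymptotically faster.


-- ===== PORT A =====

-- A's `while i**2 <= n` divisor-counting loop.  Python's `n / i == i` is float true
-- division; with n % i == 0 it is the exact integer quotient, ported as floordiv.
def divLoopA (n i c d : Int) : Int :=
  if _h : i * i ≤ n then
    if PySem.Int.mod n i = 0 then
      if PySem.Int.floordiv n i = i then divLoopA n (i + 1) c (d + 1)
      else divLoopA n (i + 1) (c + 1) d
    else divLoopA n (i + 1) c d
  else 2 * c + d
termination_by (n + 1 - i).toNat
decreasing_by
  all_goals
    have hin : i ≤ n := by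
      by_cases h0 : i ≤ 0
      · exact le_trans h0 (le_trans (mul_self_nonneg i) _h)
      · calc i = i * 1 := (mul_one i).symm
          _ ≤ i * i := mul_le_mul_of_nonneg_left (by omega) (by omega)
          _ ≤ n := _h
    omega

def divisorsA (n : Int) : Int := divLoopA n 1 0 0

-- i & (1 << j), ported by hand via Nat bitwise and; exact since here i ≥ 1 and j ≥ 0
def bitTest (i j : Int) : Int := ((i.toNat &&& ((1 : Nat) <<< j.toNat) : Nat) : Int)

-- inner loop of ps: z = sum of s[j] over set bits j of i
def innerZ (s : List Int) (i : Int) : Int :=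
  (PySem.List.pyRange 0 (s.length : Int) 1).foldl
    (fun z j => if bitTest i j ≠ 0 then z + PySem.List.pyGetD s j 0 else z) 0

-- ps(s): subset sums over all masks 1 .. 2^n - 1  (1 << n = 2^n)
def psA (s : List Int) : PySem.Set Int :=
  (PySem.List.pyRange 1 ((2 : Int) ^ s.length) 1).foldl
    (fun v i => PySem.Set.add v (innerZ s i)) PySem.Set.empty

-- the selection fold is order-independent (max of an injective key), so iterating the
-- PySem.Set's list is exact
def kinderLevon (b : List Int) : Int :=
  ((psA b).foldl
    (fun (p : Int × Int) i =>
      let d := divisorsA i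
      if d > p.1 ∨ (d = p.1 ∧ i < p.2) then (d, i) else p) ((0 : Int), (0 : Int))).2

-- ===== PORT B =====

-- B's `while i*i < n` pair-counting loop, perfect square checked after the loop
def divLoopB (n i cnt : Int) : Int :=
  if _h : i * i < n then
    divLoopB n (i + 1) (if PySem.Int.mod n i = 0 then cnt + 2 else cnt)
  else if i * i = n then cnt + 1 else cnt
termination_by (n + 1 - i).toNat
decreasing_by
  have hin : i ≤ n := by
    by_cases h0 : i ≤ 0
    · exact le_trans h0 (le_trans (mul_self_nonneg i) (le_of_lt _h))
    · calc i = i * 1 := (mul_one i).symm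
        _ ≤ i * i := mul_le_mul_of_nonneg_left (by omega) (by omega)
        _ ≤ n := le_of_lt _h
  omega

def divcountB (n : Int) : Int := divLoopB n 1 0

-- subset-sum DP: after each x, sums := sums | ({s + x for s in sums} ∪ {x})
def dpSums (b : List Int) : PySem.Set Int :=
  b.foldl
    (fun sums x => PySem.Set.union sums (PySem.Set.add (PySem.Set.ofList (sums.map (fun s => s + x))) x))
    PySem.Set.empty

def kinderLevon_alt (b : List Int) : Int :=
  ((dpSums b).foldl
    (fun (p : Int × Int) s =>
      let ds := divcountB s
      if ds > p.1 ∨ (ds = p.1 ∧ -s > -p.2) then (ds, s) else p) ((0 : Int), (0 : Int))).2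

-- ===== PRECONDITION & SPEC =====
def Spec_kinderLevon (b : List Int) (out : Int) : Prop := out = kinderLevon_alt b
instance (b : List Int) (out : Int) : Decidable (Spec_kinderLevon b out) := by unfold Spec_kinderLevon; infer_instance

-- ===== CLAIM (what is proved, stated in full; the proofs are below) =====
def Claim_equal_kinderLevon : Prop := ∀ (b : List Int), Dom_kinderLevon b → Spec_kinderLevon b (kinderLevon b)

-- ===== LEMMAS AND PROOFS =====

theorem le_mul_self_of_one_le {i : Int} (hi : 1 ≤ i) : i ≤ i * i := by
  calc i = i * 1 := (mul_one i).symm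
    _ ≤ i * i := mul_le_mul_of_nonneg_left hi (by omega)

theorem div_delta (n : Int) : ∀ k i c d cnt, (n + 1 - i).toNat ≤ k → 1 ≤ i →
    divLoopA n i c d - (2 * c + d) = divLoopB n i cnt - cnt := by
  intro k
  induction k with
  | zero =>
    intro i c d cnt hk hi
    have hii : ¬ i * i ≤ n := by
      have := le_mul_self_of_one_le hi
      omega
    rw [divLoopA, divLoopB]
    rw [dif_neg hii, dif_neg (by omega : ¬ i * i < n), if_neg (by omega : ¬ i * i = n)]
    omega
  | succ k ih =>
    intro i c d cnt hk hi
    have hipos : (0 : Int) < i := by omega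
    have hile : i ≤ i * i := le_mul_self_of_one_le hi
    by_cases h1 : i * i < n
    · have hk' : (n + 1 - (i + 1)).toNat ≤ k := by omega
      rw [divLoopA, divLoopB, dif_pos (le_of_lt h1), dif_pos h1]
      by_cases hmod : PySem.Int.mod n i = 0
      · have hdvd : i ∣ n := by
          rw [PySem.Int.mod_eq_emod_of_pos hipos] at hmod
          exact Int.dvd_of_emod_eq_zero hmod
        have hdiv : ¬ PySem.Int.floordiv n i = i := by
          intro heq
          rw [PySem.Int.floordiv_eq_ediv_of_pos hipos] at heq
          have := Int.ediv_mul_cancel hdvd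
          rw [heq] at this
          omega
        rw [if_pos hmod, if_neg hdiv, if_pos hmod]
        have := ih (i + 1) (c + 1) d (cnt + 2) hk' (by omega)
        omega
      · rw [if_neg hmod, if_neg hmod]
        exact ih (i + 1) c d cnt hk' (by omega)
    · by_cases h2 : i * i = n
      · have hmod : PySem.Int.mod n i = 0 := by
          rw [PySem.Int.mod_eq_emod_of_pos hipos, ← h2]
          exact Int.mul_emod_left i i
        have hdiv : PySem.Int.floordiv n i = i := by
          rw [PySem.Int.floordiv_eq_ediv_of_pos hipos, ← h2]
          exact Int.mul_ediv_cancel i (by omega)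
        rw [divLoopA, divLoopB, dif_pos (le_of_eq h2), dif_neg h1, if_pos h2,
          if_pos hmod, if_pos hdiv]
        have hstop : ¬ (i + 1) * (i + 1) ≤ n := by nlinarith
        rw [divLoopA, dif_neg hstop]
        omega
      · rw [divLoopA, divLoopB, dif_neg (by omega : ¬ i * i ≤ n), dif_neg h1,
          if_neg h2]
        omega

theorem divisors_eq (n : Int) : divisorsA n = divcountB n := by
  have := div_delta n (n + 1 - 1).toNat 1 0 0 0 (le_refl _) (le_refl _)
  unfold divisorsA divcountB; omega

-- "a beats b" in the selection: strictly more divisors, or equally many and smaller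
def beats (d : Int → Int) (a b : Int) : Prop := d a > d b ∨ (d a = d b ∧ a < b)

def selFold (d : Int → Int) (m : Int) (l : List Int) : Int :=
  l.foldl (fun m i => if d i > d m ∨ (d i = d m ∧ i < m) then i else m) m

theorem beats_irrefl (d : Int → Int) (a : Int) : ¬ beats d a a := by unfold beats; omega

theorem beats_asymm (d : Int → Int) {a b : Int} (h : beats d a b) : ¬ beats d b a := by
  unfold beats at *; omega

theorem beats_total (d : Int → Int) {a b : Int} (h : a ≠ b) : beats d a b ∨ beats d b a := by
  unfold beats; rcases lt_trichotomy (d a) (d b) with h1 | h1 | h1 <;> omega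

theorem not_beats_trans (d : Int → Int) {a b c : Int} (h1 : ¬ beats d a b) (h2 : ¬ beats d b c) :
    ¬ beats d a c := by unfold beats at *; omega

theorem selFold_mem (d : Int → Int) (l : List Int) : ∀ m, selFold d m l ∈ m :: l := by
  induction l with
  | nil => intro m; simp [selFold]
  | cons i l ih =>
    intro m
    by_cases hb : d i > d m ∨ (d i = d m ∧ i < m)
    · have h := ih i
      simp only [selFold, List.foldl_cons, if_pos hb]
      simp only [selFold] at h
      rcases List.mem_cons.1 h with h' | h' <;> simp [h']
    · have h := ih m
      simp only [selFold, List.foldl_cons, if_neg hb]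
      simp only [selFold] at h
      rcases List.mem_cons.1 h with h' | h' <;> simp [h']

theorem selFold_not_beats (d : Int → Int) (l : List Int) :
    ∀ m y, y ∈ m :: l → ¬ beats d y (selFold d m l) := by
  induction l with
  | nil => intro m y hy; simp at hy; subst hy; simp [selFold, beats_irrefl]
  | cons i l ih =>
    intro m y hy
    by_cases hb : d i > d m ∨ (d i = d m ∧ i < m)
    · have hstep : selFold d m (i :: l) = selFold d i l := by
        simp only [selFold, List.foldl_cons, if_pos hb]
      rw [hstep]
      rcases List.mem_cons.1 hy with h' | h'
      · subst h'
        exact not_beats_trans d (beats_asymm d hb) (ih i i List.mem_cons_self)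
      · rcases List.mem_cons.1 h' with h'' | h''
        · subst h''; exact ih y y List.mem_cons_self
        · exact ih i y (List.mem_cons_of_mem _ h'')
    · have hstep : selFold d m (i :: l) = selFold d m l := by
        simp only [selFold, List.foldl_cons, if_neg hb]
      rw [hstep]
      rcases List.mem_cons.1 hy with h' | h'
      · subst h'; exact ih y y List.mem_cons_self
      · rcases List.mem_cons.1 h' with h'' | h''
        · subst h''
          exact not_beats_trans d hb (ih m m List.mem_cons_self)
        · exact ih m y (List.mem_cons_of_mem _ h'')

theorem selFold_congr (d : Int → Int) (m : Int) (l l' : List Int)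
    (h : ∀ x, x ∈ m :: l ↔ x ∈ m :: l') : selFold d m l = selFold d m l' := by
  by_contra hne
  rcases beats_total d hne with hb | hb
  · exact selFold_not_beats d l' m _ ((h _).1 (selFold_mem d l m)) hb
  · exact selFold_not_beats d l m _ ((h _).2 (selFold_mem d l' m)) hb

-- the pair fold of both ports is selFold with the divisor count carried along
theorem pair_fold_eq (d : Int → Int) (l : List Int) : ∀ m,
    l.foldl (fun (p : Int × Int) i =>
      if d i > p.1 ∨ (d i = p.1 ∧ i < p.2) then (d i, i) else p) (d m, m)
    = (d (selFold d m l), selFold d m l) := by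
  induction l with
  | nil => intro m; simp [selFold]
  | cons i l ih =>
    intro m
    have hstep : selFold d m (i :: l) = selFold d (if d i > d m ∨ (d i = d m ∧ i < m) then i else m) l := by
      simp only [selFold, List.foldl_cons]
    rw [hstep, ← ih (if d i > d m ∨ (d i = d m ∧ i < m) then i else m)]
    simp only [List.foldl_cons]
    congr 1
    by_cases hb : d i > d m ∨ (d i = d m ∧ i < m)
    · rw [if_pos hb, if_pos hb]
    · rw [if_neg hb, if_neg hb]

-- mask sum over Nat bits
def msum (s : List Int) (i : Nat) : Int :=
  ((List.range s.length).map (fun j => if i.testBit j then s.getD j 0 else 0)).sum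

theorem foldl_ite_add (c : Nat → Prop) [DecidablePred c] (f : Nat → Int) (l : List Nat) :
    ∀ z : Int, l.foldl (fun z j => if c j then z + f j else z) z
      = z + (l.map (fun j => if c j then f j else 0)).sum := by
  induction l with
  | nil => intro z; simp
  | cons a l ih =>
    intro z
    simp only [List.foldl_cons, List.map_cons, List.sum_cons, ih]
    by_cases hc : c a <;> simp [hc, add_assoc]

theorem bitTest_natCast (i j : Nat) :
    (bitTest (i : Int) (j : Int) ≠ 0) ↔ i.testBit j = true := by
  unfold bitTest
  simp only [Int.toNat_natCast, Nat.one_shiftLeft, Nat.and_two_pow]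
  cases h : i.testBit j
  · simp
  · simp only [Bool.toNat_true, one_mul, ne_eq, Nat.cast_eq_zero]
    simp

theorem innerZ_eq (s : List Int) (i : Nat) : innerZ s (i : Int) = msum s i := by
  unfold innerZ msum
  rw [PySem.List.pyRange_zero_nat, List.foldl_map]
  have := foldl_ite_add (fun j : Nat => bitTest (i : Int) (j : Int) ≠ 0)
    (fun j : Nat => PySem.List.pyGetD s (j : Int) 0) (List.range s.length) 0
  simp only [this, zero_add]
  congr 1
  apply List.map_congr_left
  intro j _
  by_cases hb : i.testBit j
  · rw [if_pos ((bitTest_natCast i j).2 hb), if_pos hb, PySem.List.pyGetD_natCast]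
  · rw [if_neg (by simpa [hb] using (bitTest_natCast i j).not), if_neg hb]

theorem mem_foldl_add (f : Int → Int) (l : List Int) :
    ∀ (v : PySem.Set Int) (z : Int),
      z ∈ l.foldl (fun v i => PySem.Set.add v (f i)) v ↔ z ∈ v ∨ ∃ i ∈ l, f i = z := by
  induction l with
  | nil => intro v z; simp
  | cons a l ih =>
    intro v z
    simp only [List.foldl_cons, ih, PySem.Set.mem_add]
    constructor
    · rintro ((h | h) | ⟨i, hi, hz⟩)
      · exact Or.inl h
      · exact Or.inr ⟨a, by simp, h.symm⟩
      · exact Or.inr ⟨i, by simp [hi], hz⟩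
    · rintro (h | ⟨i, hi, hz⟩)
      · exact Or.inl (Or.inl h)
      · rcases List.mem_cons.1 hi with h' | h'
        · subst h'; exact Or.inl (Or.inr hz.symm)
        · exact Or.inr ⟨i, h', hz⟩

theorem mem_psA (s : List Int) (z : Int) :
    z ∈ psA s ↔ ∃ i : Nat, 1 ≤ i ∧ i < 2 ^ s.length ∧ msum s i = z := by
  unfold psA
  rw [mem_foldl_add]
  have hemp : z ∉ (PySem.Set.empty : PySem.Set Int) := by simp [PySem.Set.empty]
  simp only [hemp, false_or]
  constructor
  · rintro ⟨i, hi, hz⟩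
    rw [PySem.List.mem_pyRange_one] at hi
    have h2 : ((2 ^ s.length : Nat) : Int) = (2 : Int) ^ s.length := by push_cast; ring
    refine ⟨i.toNat, by omega, by omega, ?_⟩
    rw [← innerZ_eq]
    rwa [Int.toNat_of_nonneg (by omega)]
  · rintro ⟨i, h1, h2, hz⟩
    refine ⟨(i : Int), ?_, by rw [innerZ_eq]; exact hz⟩
    rw [PySem.List.mem_pyRange_one]
    have : ((2 ^ s.length : Nat) : Int) = (2 : Int) ^ s.length := by push_cast; ring
    omega

theorem mem_dpSums_snoc (s : List Int) (x z : Int) :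
    z ∈ dpSums (s ++ [x]) ↔ z ∈ dpSums s ∨ (∃ t ∈ dpSums s, t + x = z) ∨ z = x := by
  unfold dpSums
  rw [List.foldl_append]
  simp only [List.foldl_cons, List.foldl_nil, PySem.Set.mem_union, PySem.Set.mem_add,
    PySem.Set.mem_ofList, List.mem_map]

theorem msum_zero (s : List Int) : msum s 0 = 0 := by
  simp [msum, Nat.zero_testBit]

theorem msum_append (s : List Int) (x : Int) (i : Nat) :
    msum (s ++ [x]) i = msum s i + (if i.testBit s.length then x else 0) := by
  unfold msum
  rw [List.length_append, List.length_singleton, List.range_succ, List.map_append,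
    List.sum_append]
  congr 1
  · congr 1
    apply List.map_congr_left
    intro j hj
    rw [List.mem_range] at hj
    rw [List.getD_append s [x] 0 j hj]
  · simp [List.getD]

theorem msum_congr_low (s : List Int) (i i' : Nat)
    (h : ∀ j < s.length, i.testBit j = i'.testBit j) : msum s i = msum s i' := by
  unfold msum
  congr 1
  apply List.map_congr_left
  intro j hj
  rw [List.mem_range] at hj
  rw [h j hj]

theorem msum_high (s : List Int) (x : Int) (i' : Nat) (h : i' < 2 ^ s.length) :
    msum (s ++ [x]) (2 ^ s.length + i') = msum s i' + x := by
  rw [msum_append]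
  have ht : (2 ^ s.length + i').testBit s.length = true := by
    rw [Nat.testBit_two_pow_add_eq, Nat.testBit_lt_two_pow h]
    rfl
  rw [ht, if_pos rfl]
  congr 1
  exact msum_congr_low s _ _ (fun j hj => Nat.testBit_two_pow_add_gt hj i')

theorem mem_psA_iff_mem_dpSums (b : List Int) (z : Int) : z ∈ psA b ↔ z ∈ dpSums b := by
  induction b using List.reverseRecOn generalizing z with
  | nil =>
    rw [mem_psA]
    constructor
    · rintro ⟨i, h1, h2, _⟩; simp at h2; omega
    · intro h; simp [dpSums, PySem.Set.empty] at h
  | append_singleton s x ih =>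
    rw [mem_psA, mem_dpSums_snoc, ← ih z]
    rw [mem_psA]
    have hmid : (∃ t ∈ dpSums s, t + x = z) ↔
        ∃ i' : Nat, 1 ≤ i' ∧ i' < 2 ^ s.length ∧ msum s i' + x = z := by
      constructor
      · rintro ⟨t, ht, hz⟩
        rcases (mem_psA s t).1 ((ih t).2 ht) with ⟨i', h1, h2, h3⟩
        exact ⟨i', h1, h2, by rw [h3]; exact hz⟩
      · rintro ⟨i', h1, h2, hz⟩
        exact ⟨msum s i', (ih _).1 ((mem_psA s _).2 ⟨i', h1, h2, rfl⟩), hz⟩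
    rw [hmid]
    have hlen : (s ++ [x]).length = s.length + 1 := by simp
    have hpow : (0:Nat) < 2 ^ s.length := Nat.two_pow_pos s.length
    constructor
    · rintro ⟨i, h1, h2, hz⟩
      rw [hlen, pow_succ] at h2
      by_cases hlow : i < 2 ^ s.length
      · left
        refine ⟨i, h1, hlow, ?_⟩
        rw [msum_append, Nat.testBit_lt_two_pow hlow, if_neg (by simp)] at hz
        omega
      · have hi' : i = 2 ^ s.length + (i - 2 ^ s.length) := by omega
        have hlt : i - 2 ^ s.length < 2 ^ s.length := by omega
        rw [hi', msum_high s x _ hlt] at hz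
        by_cases h0 : i - 2 ^ s.length = 0
        · right; right
          rw [h0, msum_zero] at hz
          omega
        · right; left
          exact ⟨i - 2 ^ s.length, by omega, hlt, hz⟩
    · rintro (⟨i, h1, h2, hz⟩ | ⟨i', h1, h2, hz⟩ | hz)
      · refine ⟨i, h1, by rw [hlen, pow_succ]; omega, ?_⟩
        rw [msum_append, Nat.testBit_lt_two_pow h2, if_neg (by simp)]
        omega
      · refine ⟨2 ^ s.length + i', by omega, by rw [hlen, pow_succ]; omega, ?_⟩
        rw [msum_high s x i' h2]
        exact hz
      · refine ⟨2 ^ s.length, by omega, by rw [hlen, pow_succ]; omega, ?_⟩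
        have := msum_high s x 0 hpow
        rw [Nat.add_zero, msum_zero, zero_add] at this
        rw [this]
        exact hz.symm

theorem kinderLevon_eq_selFold (b : List Int) :
    kinderLevon b = selFold divisorsA 0 (psA b) := by
  have h0 : divisorsA 0 = 0 := by unfold divisorsA divLoopA; norm_num
  have := pair_fold_eq divisorsA (psA b) 0
  rw [h0] at this
  unfold kinderLevon
  rw [this]

theorem kinderLevon_alt_eq_selFold (b : List Int) :
    kinderLevon_alt b = selFold divcountB 0 (dpSums b) := by
  have h0 : divcountB 0 = 0 := by unfold divcountB divLoopB; norm_num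
  have hfun : (fun (p : Int × Int) s =>
        let ds := divcountB s
        if ds > p.1 ∨ (ds = p.1 ∧ -s > -p.2) then (ds, s) else p)
      = (fun (p : Int × Int) i =>
        if divcountB i > p.1 ∨ (divcountB i = p.1 ∧ i < p.2) then (divcountB i, i) else p) := by
    funext p i
    show (if divcountB i > p.1 ∨ (divcountB i = p.1 ∧ -i > -p.2) then (divcountB i, i) else p)
      = _
    apply if_congr _ rfl rfl
    constructor <;> intro h <;> [exact h.imp id (fun h' => ⟨h'.1, by omega⟩);
      exact h.imp id (fun h' => ⟨h'.1, by omega⟩)]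
  unfold kinderLevon_alt
  rw [hfun]
  have := pair_fold_eq divcountB (dpSums b) 0
  rw [h0] at this
  rw [this]

theorem kinderLevon_eq_alt (b : List Int) : kinderLevon b = kinderLevon_alt b := by
  have hd : divisorsA = divcountB := funext divisors_eq
  rw [kinderLevon_eq_selFold, kinderLevon_alt_eq_selFold, hd]
  exact selFold_congr _ 0 _ _ (by
    intro x
    simp only [List.mem_cons]
    rw [mem_psA_iff_mem_dpSums])

-- ===== VERDICT (by name: the statement is the Claim_ definition above) =====
theorem kinderLevon_spec : Claim_equal_kinderLevon := by
  intro b _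
  unfold Spec_kinderLevon
  exact kinderLevon_eq_alt b
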